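-- pv_equiv track=rewrite | github.com/kenkov/smt | decode.py | _calc_remain_phrases
-- ===== SOURCE A (Python) =====
-- def _calc_remain_phrases(phrase, phrases):
--     """
--     >>> res = remain_phrases(((2, u'is'),),
--                              set([((1, u'he'),),
--                                   ((2, u'is'),),
--                                   ((3, u'a'),),
--                                   ((2, u'is'),
--                                    (3, u'a')),
--                                   ((4, u'teacher'),)]))
--     set([((1, u'he'),), ((3, u'a'),), ((4, u'teacher'),)])
--     >>> res = remain_phrases(((2, u'is'), (3, u'a')),
--                              set([((1, u'he'),),
--                                   ((2, u'is'),),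
--                                   ((3, u'a'),),
--                                   ((2, u'is'),
--                                    (3, u'a')),
--                                   ((4, u'teacher'),)]))
--     set([((1, u'he'),), ((4, u'teacher'),)])
--     """
--     s = set()
--     for ph in phrases:
--         for p in phrase:
--             if p in ph:
--                 break
--         else:
--             s.add(ph)
--     return s
-- ===== SOURCE B (Python) =====
-- def _calc_remain_phrases(phrase, phrases):
--     # Build an inverted index: element -> set of phrases containing it,
--     # then drop every phrase hit by some element of `phrase`.
--     index = {}
--     for ph in phrases:
--         for p in ph:
--             index.setdefault(p, set()).add(ph)
--     excluded = set()
--     for p in phrase: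
--         excluded |= index.get(p, set())
--     return set(phrases) - excluded
-- ===== Notes on version B (the rewrite author's own statement) =====
-- stated objective: faster
-- what changed: Replaces the per-candidate disjointness scan (for each candidate phrase, scan the query elements with membership tests) by building an inverted index element->phrases once, unioning the index entries of the query elements into an excluded set, and returning set(phrases) minus it.
import Mathlib
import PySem

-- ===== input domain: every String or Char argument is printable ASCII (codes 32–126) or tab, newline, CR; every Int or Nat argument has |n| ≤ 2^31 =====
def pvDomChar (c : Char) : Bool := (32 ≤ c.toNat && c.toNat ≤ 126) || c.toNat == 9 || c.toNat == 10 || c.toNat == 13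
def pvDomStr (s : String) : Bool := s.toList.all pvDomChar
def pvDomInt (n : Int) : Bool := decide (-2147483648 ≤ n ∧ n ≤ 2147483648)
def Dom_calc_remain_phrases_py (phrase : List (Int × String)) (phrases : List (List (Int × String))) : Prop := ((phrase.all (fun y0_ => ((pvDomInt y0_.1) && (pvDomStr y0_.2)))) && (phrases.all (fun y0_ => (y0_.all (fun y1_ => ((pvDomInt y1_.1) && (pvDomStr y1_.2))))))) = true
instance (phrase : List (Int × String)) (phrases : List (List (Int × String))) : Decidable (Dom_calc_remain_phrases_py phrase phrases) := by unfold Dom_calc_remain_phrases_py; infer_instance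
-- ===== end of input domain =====

-- B replaces A's per-candidate scan by an inverted index (element -> phrases), a union of the
-- query elements' index entries, and a set difference; a timing run measured B faster on the larger generated inputs.


-- ===== PORT A =====
-- s = set(); for ph in phrases: (for p in phrase: if p in ph: break / else: s.add(ph)); return s
-- the 'for p in phrase … break / else' loop is rendered as List.any over phrase.
def calc_remain_phrases_py (phrase : List (Int × String)) (phrases : List (List (Int × String))) : List (List (Int × String)) :=
  phrases.foldl
    (fun s ph => if phrase.any (fun p => ph.contains p) then s else PySem.Set.add s ph)
    PySem.Set.empty

-- ===== PORT B =====
-- index = {}; for ph in phrases: for p in ph: index.setdefault(p, set()).add(ph)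
def pvIndexB (phrases : List (List (Int × String))) : PySem.Dict (Int × String) (PySem.Set (List (Int × String))) :=
  phrases.foldl
    (fun d ph => ph.foldl (fun d p => d.modify p PySem.Set.empty (fun s => s.add ph)) d)
    PySem.Dict.empty

def calc_remain_phrases_py_alt (phrase : List (Int × String)) (phrases : List (List (Int × String))) : List (List (Int × String)) :=
  let index := pvIndexB phrases
  -- excluded = set(); for p in phrase: excluded |= index.get(p, set())
  let excluded : PySem.Set (List (Int × String)) :=
    phrase.foldl (fun acc p => acc.union (index.getD p PySem.Set.empty)) PySem.Set.empty
  -- return set(phrases) - excluded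
  PySem.Set.diff (PySem.Set.ofList phrases) excluded

-- ===== PRECONDITION & SPEC =====
def Spec_calc_remain_phrases_py (phrase : List (Int × String)) (phrases : List (List (Int × String))) (out : List (List (Int × String))) : Prop := out = calc_remain_phrases_py_alt phrase phrases
instance (phrase : List (Int × String)) (phrases : List (List (Int × String))) (out : List (List (Int × String))) : Decidable (Spec_calc_remain_phrases_py phrase phrases out) := by unfold Spec_calc_remain_phrases_py; infer_instance

-- ===== CLAIM (what is proved, stated in full; the proofs are below) =====
def Claim_equal_calc_remain_phrases_py : Prop := ∀ (phrase : List (Int × String)) (phrases : List (List (Int × String))), Dom_calc_remain_phrases_py phrase phrases → Spec_calc_remain_phrases_py phrase phrases (calc_remain_phrases_py phrase phrases)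

-- ===== LEMMAS AND PROOFS =====

-- A's guarded add-loop is the add-loop over the filtered list.
theorem pv_foldl_if_filter {α : Type} [BEq α] [LawfulBEq α] (c : α → Bool) :
    ∀ (l : List α) (s : PySem.Set α),
      l.foldl (fun s x => if c x then s else PySem.Set.add s x) s
        = (l.filter (fun x => !c x)).foldl PySem.Set.add s := by
  intro l
  induction l with
  | nil => intro s; rfl
  | cons x l ih =>
    intro s
    by_cases h : c x = true <;> simp [h, ih]

-- filtering commutes with the add-fold.
theorem pv_filter_add {α : Type} [BEq α] [LawfulBEq α] (p : α → Bool) (s : PySem.Set α) (x : α) :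
    (PySem.Set.add s x).filter p = if p x then PySem.Set.add (s.filter p) x else s.filter p := by
  rw [PySem.Set.add_eq_ite, PySem.Set.add_eq_ite]
  by_cases hm : x ∈ s <;> by_cases hp : p x = true <;>
    simp [hm, hp, List.filter_append, List.mem_filter]

theorem pv_filter_foldl_add {α : Type} [BEq α] [LawfulBEq α] (p : α → Bool) :
    ∀ (l : List α) (s : PySem.Set α),
      (l.foldl PySem.Set.add s).filter p = (l.filter p).foldl PySem.Set.add (s.filter p) := by
  intro l
  induction l with
  | nil => intro s; rfl
  | cons x l ih =>
    intro s
    by_cases hp : p x = true <;>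
      simp [hp, ih, pv_filter_add, List.foldl_cons]

-- membership in the inner index-building fold over one phrase's elements.
theorem pv_mem_inner (ph x : List (Int × String)) (q : Int × String) :
    ∀ (elems : List (Int × String)) (d : PySem.Dict (Int × String) (PySem.Set (List (Int × String)))),
      (x ∈ (elems.foldl (fun d p => d.modify p PySem.Set.empty (fun s => s.add ph)) d).getD q PySem.Set.empty
        ↔ x ∈ d.getD q PySem.Set.empty ∨ (x = ph ∧ q ∈ elems)) := by
  intro elems
  induction elems with
  | nil => intro d; simp
  | cons p elems ih =>
    intro d
    rw [List.foldl_cons, ih]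
    simp only [PySem.Dict.modify, PySem.Dict.getD_insert]
    by_cases hq : q = p
    · subst hq
      simp [PySem.Set.mem_add]
      tauto
    · simp [hq]

-- membership in the full index.
theorem pv_mem_index (x : List (Int × String)) (q : Int × String) :
    ∀ (l : List (List (Int × String))) (d : PySem.Dict (Int × String) (PySem.Set (List (Int × String)))),
      (x ∈ (l.foldl (fun d ph => ph.foldl (fun d p => d.modify p PySem.Set.empty (fun s => s.add ph)) d) d).getD q PySem.Set.empty
        ↔ x ∈ d.getD q PySem.Set.empty ∨ (x ∈ l ∧ q ∈ x)) := by
  intro l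
  induction l with
  | nil => intro d; simp
  | cons ph l ih =>
    intro d
    rw [List.foldl_cons, ih, pv_mem_inner]
    constructor
    · rintro ((h | ⟨rfl, h⟩) | ⟨h1, h2⟩)
      · exact Or.inl h
      · exact Or.inr ⟨List.mem_cons_self, h⟩
      · exact Or.inr ⟨List.mem_cons_of_mem _ h1, h2⟩
    · rintro (h | ⟨h1, h2⟩)
      · exact Or.inl (Or.inl h)
      · rcases List.mem_cons.mp h1 with h1 | h1
        · subst h1; exact Or.inl (Or.inr ⟨rfl, h2⟩)
        · exact Or.inr ⟨h1, h2⟩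

-- membership in the excluded union fold.
theorem pv_mem_excluded (index : PySem.Dict (Int × String) (PySem.Set (List (Int × String)))) (x : List (Int × String)) :
    ∀ (l : List (Int × String)) (acc : PySem.Set (List (Int × String))),
      (x ∈ l.foldl (fun acc p => acc.union (index.getD p PySem.Set.empty)) acc
        ↔ x ∈ acc ∨ ∃ p ∈ l, x ∈ index.getD p PySem.Set.empty) := by
  intro l
  induction l with
  | nil => intro acc; simp
  | cons p l ih =>
    intro acc
    rw [List.foldl_cons, ih]
    simp [PySem.Set.mem_union]
    tauto

-- ===== VERDICT (by name: the statement is the Claim_ definition above) =====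
theorem calc_remain_phrases_py_spec : Claim_equal_calc_remain_phrases_py := by
  intro phrase phrases _
  unfold Spec_calc_remain_phrases_py calc_remain_phrases_py calc_remain_phrases_py_alt
  simp only []
  rw [pv_foldl_if_filter]
  rw [PySem.Set.ofList_eq_foldl]
  unfold PySem.Set.diff
  rw [pv_filter_foldl_add]
  have hfc : (phrases.filter (fun ph => !phrase.any (fun p => ph.contains p)))
      = phrases.filter (fun ph =>
          !((phrase.foldl (fun acc p => acc.union ((pvIndexB phrases).getD p PySem.Set.empty)) PySem.Set.empty).contains ph)) := by
    apply List.filter_congr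
    intro ph hph
    congr 1
    rw [Bool.eq_iff_iff]
    constructor
    · intro h
      rcases List.any_eq_true.mp h with ⟨p, hp, hc⟩
      apply (PySem.Set.contains_iff _ _).mpr
      rw [pv_mem_excluded]
      refine Or.inr ⟨p, hp, ?_⟩
      unfold pvIndexB
      rw [pv_mem_index]
      exact Or.inr ⟨hph, List.contains_iff_mem.mp hc⟩
    · intro h
      have := (PySem.Set.contains_iff _ _).mp h
      rw [pv_mem_excluded] at this
      rcases this with h' | ⟨p, hp, hm⟩
      · simp [PySem.Set.empty] at h'
      · unfold pvIndexB at hm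
        rw [pv_mem_index] at hm
        rcases hm with h' | ⟨_, hq⟩
        · simp at h'
        · exact List.any_eq_true.mpr ⟨p, hp, List.contains_iff_mem.mpr hq⟩
  rw [hfc]
  rfl
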